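-- pv_equiv track=rewrite | github.com/calledforth/readaloud | src/serverless/handler/utils/cleaning.py | _enforce_min_chunk_length
-- ===== SOURCE A (Python) =====
-- from typing import List
--
-- def _enforce_min_chunk_length(chunks: List[str], min_chars: int) -> List[str]:
--     if min_chars <= 0 or not chunks:
--         return chunks
--     result: List[str] = []
--     i = 0
--     while i < len(chunks):
--         cur = chunks[i]
--         if len(cur.strip()) >= min_chars or i == len(chunks) - 1:
--             result.append(cur)
--             i += 1
--             continue
--         # Merge forward until threshold or end
--         j = i + 1
--         merged = cur
--         while j < len(chunks) and len(merged.strip()) < min_chars: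
--             merged = merged + "\n\n" + chunks[j]
--             j += 1
--         result.append(merged)
--         i = j
--     return result
-- ===== SOURCE B (Python) =====
-- from typing import List
--
-- def _enforce_min_chunk_length(chunks: List[str], min_chars: int) -> List[str]:
--     result: List[str] = []
--     buf = None
--     for c in chunks:
--         buf = c if buf is None else buf + "\n\n" + c
--         if len(buf.strip()) >= min_chars:
--             result.append(buf)
--             buf = None
--     if buf is not None:
--         result.append(buf)
--     return result
-- ===== Notes on version B (the rewrite author's own statement) =====
-- stated objective: simpler
-- what changed: Replaced A's index-driven outer while-loop with a nested lookahead while-loop by a single for-loop over the chunks that keeps one pending buffer string, flushing it whenever its stripped length reaches the threshold; the min_chars<=0/empty guard disappears because the buffer loop already returns the list unchanged there.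
import Mathlib
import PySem

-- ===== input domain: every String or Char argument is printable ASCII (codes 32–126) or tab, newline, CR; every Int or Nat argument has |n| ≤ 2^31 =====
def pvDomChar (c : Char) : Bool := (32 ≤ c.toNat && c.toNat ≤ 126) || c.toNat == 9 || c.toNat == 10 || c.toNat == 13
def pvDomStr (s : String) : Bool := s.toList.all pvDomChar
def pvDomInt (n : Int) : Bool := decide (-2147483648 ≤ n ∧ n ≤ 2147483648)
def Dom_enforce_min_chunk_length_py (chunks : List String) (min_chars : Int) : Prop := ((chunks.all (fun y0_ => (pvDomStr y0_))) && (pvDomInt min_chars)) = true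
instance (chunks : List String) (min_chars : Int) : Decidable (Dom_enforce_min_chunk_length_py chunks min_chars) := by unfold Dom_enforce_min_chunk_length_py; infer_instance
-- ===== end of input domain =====

-- B replaces A's outer-while with nested lookahead-while by a single pass keeping a pending
-- buffer (objective: simpler — one loop, one piece of state, no index arithmetic, no guard).

-- len(s.strip()) — shared helper, used literally by both Pythons
def pvLenStrip (s : String) : Int := PySem.Str.len (PySem.Str.strip s)

-- ===== PORT A =====
-- inner `while j < len(chunks) and len(merged.strip()) < min_chars` loop; returns (merged, j)
def pvMergeA (chunks : List String) (min_chars : Int) (merged : String) (j : Nat) :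
    String × Nat :=
  if h : j < chunks.length ∧ pvLenStrip merged < min_chars then
    pvMergeA chunks min_chars (merged ++ "\n\n" ++ chunks[j]) (j + 1)
  else (merged, j)
termination_by chunks.length - j
decreasing_by omega

-- (termination helper for the outer loop: the inner loop never moves j backwards)
theorem pvMergeA_ge (chunks : List String) (min_chars : Int) (merged : String) (j : Nat) :
    j ≤ (pvMergeA chunks min_chars merged j).2 := by
  rw [pvMergeA]
  split
  · exact le_trans (Nat.le_succ j) (pvMergeA_ge chunks min_chars _ (j + 1))
  · exact le_refl j
termination_by chunks.length - j
decreasing_by omega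

-- outer `while i < len(chunks)` loop carrying `result`
def pvOuterA (chunks : List String) (min_chars : Int) (result : List String) (i : Nat) :
    List String :=
  if h : i < chunks.length then
    let cur := chunks[i]
    if min_chars ≤ pvLenStrip cur ∨ i = chunks.length - 1 then
      pvOuterA chunks min_chars (result ++ [cur]) (i + 1)
    else
      let mj := pvMergeA chunks min_chars cur (i + 1)
      pvOuterA chunks min_chars (result ++ [mj.1]) mj.2
  else result
termination_by chunks.length - i
decreasing_by
  · omega
  · have := pvMergeA_ge chunks min_chars chunks[i] (i + 1)
    omega

def enforce_min_chunk_length_py (chunks : List String) (min_chars : Int) : List String :=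
  if min_chars ≤ 0 ∨ chunks = [] then chunks
  else pvOuterA chunks min_chars [] 0

-- ===== PORT B =====
-- single pass: `buf` is the pending (not yet long enough) accumulation, flushed when long enough
def pvGoB (min_chars : Int) (result : List String) (buf : Option String) :
    List String → List String
  | [] =>
    match buf with
    | none => result
    | some b => result ++ [b]
  | c :: rest =>
    let b := match buf with
             | none => c
             | some bb => bb ++ "\n\n" ++ c
    if min_chars ≤ pvLenStrip b then pvGoB min_chars (result ++ [b]) none rest
    else pvGoB min_chars result (some b) rest

def enforce_min_chunk_length_py_alt (chunks : List String) (min_chars : Int) : List String :=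
  pvGoB min_chars [] none chunks

-- ===== PRECONDITION & SPEC =====
def Spec_enforce_min_chunk_length_py (chunks : List String) (min_chars : Int) (out : List String) : Prop := out = enforce_min_chunk_length_py_alt chunks min_chars
instance (chunks : List String) (min_chars : Int) (out : List String) : Decidable (Spec_enforce_min_chunk_length_py chunks min_chars out) := by unfold Spec_enforce_min_chunk_length_py; infer_instance

-- ===== CLAIM (what is proved, stated in full; the proofs are below) =====
def Claim_equal_enforce_min_chunk_length_py : Prop := ∀ (chunks : List String) (min_chars : Int), Dom_enforce_min_chunk_length_py chunks min_chars → Spec_enforce_min_chunk_length_py chunks min_chars (enforce_min_chunk_length_py chunks min_chars)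

-- ===== LEMMAS AND PROOFS =====

theorem pvLenStrip_nonneg (s : String) : 0 ≤ pvLenStrip s := by
  simp [pvLenStrip, PySem.Str.len_eq]

-- with a non-positive threshold every chunk flushes immediately
theorem pvGoB_nonpos (min_chars : Int) (h : min_chars ≤ 0) :
    ∀ (l : List String) (res : List String), pvGoB min_chars res none l = res ++ l := by
  intro l
  induction l with
  | nil => intro res; simp [pvGoB]
  | cons c rest ih =>
    intro res
    have hc : min_chars ≤ pvLenStrip c := le_trans h (pvLenStrip_nonneg c)
    simp only [pvGoB, if_pos hc]
    rw [ih]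
    simp

-- the simultaneous invariant: A's outer loop = B's buffer-empty state, and
-- A's inner merge loop (followed by the outer loop) = B's buffer-pending state
theorem pvMain (chunks : List String) (min_chars : Int) : ∀ k : Nat,
    (∀ i res, chunks.length - i ≤ k →
        pvOuterA chunks min_chars res i = pvGoB min_chars res none (chunks.drop i)) ∧
    (∀ j merged res, chunks.length - j ≤ k → pvLenStrip merged < min_chars →
        pvGoB min_chars res (some merged) (chunks.drop j)
          = pvOuterA chunks min_chars (res ++ [(pvMergeA chunks min_chars merged j).1])
              ((pvMergeA chunks min_chars merged j).2)) := by
  intro k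
  induction k with
  | zero =>
    constructor
    · intro i res hk
      have hi : ¬ i < chunks.length := by omega
      rw [pvOuterA, dif_neg hi, List.drop_eq_nil_of_le (by omega)]
      simp [pvGoB]
    · intro j merged res hk _
      have hj : ¬ j < chunks.length := by omega
      rw [pvMergeA, dif_neg (by intro h; exact hj h.1)]
      rw [List.drop_eq_nil_of_le (by omega)]
      rw [pvOuterA, dif_neg hj]
      simp [pvGoB]
  | succ k ih =>
    constructor
    · intro i res hk
      by_cases hi : i < chunks.length
      · rw [pvOuterA, dif_pos hi, List.drop_eq_getElem_cons hi]
        by_cases hcur : min_chars ≤ pvLenStrip chunks[i]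
        · rw [if_pos (Or.inl hcur)]
          simp only [pvGoB, if_pos hcur]
          exact ih.1 (i + 1) (res ++ [chunks[i]]) (by omega)
        · simp only [pvGoB, if_neg hcur]
          by_cases hlast : i = chunks.length - 1
          · rw [if_pos (Or.inr hlast)]
            have hdrop : chunks.drop (i + 1) = [] :=
              List.drop_eq_nil_of_le (by omega)
            rw [hdrop]
            rw [pvOuterA, dif_neg (by omega)]
            simp [pvGoB]
          · rw [if_neg (by tauto)]
            have h2 := ih.2 (i + 1) chunks[i] res (by omega) (by omega)
            rw [h2]
      · rw [pvOuterA, dif_neg hi, List.drop_eq_nil_of_le (by omega)]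
        simp [pvGoB]
    · intro j merged res hk hm
      by_cases hj : j < chunks.length
      · rw [List.drop_eq_getElem_cons hj]
        rw [pvMergeA, dif_pos ⟨hj, hm⟩]
        simp only [pvGoB]
        by_cases hb : min_chars ≤ pvLenStrip (merged ++ "\n\n" ++ chunks[j])
        · rw [if_pos hb]
          rw [pvMergeA, dif_neg (by intro h; omega)]
          exact (ih.1 (j + 1) (res ++ [merged ++ "\n\n" ++ chunks[j]]) (by omega)).symm
        · rw [if_neg hb]
          exact ih.2 (j + 1) (merged ++ "\n\n" ++ chunks[j]) res (by omega) (by omega)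
      · rw [pvMergeA, dif_neg (by intro h; exact hj h.1)]
        rw [List.drop_eq_nil_of_le (by omega)]
        rw [pvOuterA, dif_neg hj]
        simp [pvGoB]

-- ===== VERDICT (by name: the statement is the Claim_ definition above) =====
theorem enforce_min_chunk_length_py_spec : Claim_equal_enforce_min_chunk_length_py := by
  intro chunks min_chars _
  unfold Spec_enforce_min_chunk_length_py enforce_min_chunk_length_py
      enforce_min_chunk_length_py_alt
  by_cases hg : min_chars ≤ 0 ∨ chunks = []
  · rw [if_pos hg]
    rcases hg with h | h
    · rw [pvGoB_nonpos min_chars h chunks []]; simp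
    · subst h; simp [pvGoB]
  · rw [if_neg hg]
    have := (pvMain chunks min_chars chunks.length).1 0 [] (by omega)
    simpa using this
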